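-- pv_equiv track=rewrite | github.com/henryhardigan/contact-alignment | src/mj_align/dynamic_programming.py | proline_run_ids
-- ===== SOURCE A (Python) =====
-- def proline_run_ids(seq: str) -> list[int]:
--     """Assign run IDs to positions in proline runs.
--
--     Each proline run (length >= 2) gets a unique ID starting from 0.
--     Positions not in proline runs get -1.
--
--     Args:
--         seq: Protein sequence.
--
--     Returns:
--         List of run IDs (-1 for non-run positions).
--
--     Example:
--         >>> proline_run_ids("APPBPPC")
--         [-1, 0, 0, -1, 1, 1, -1]
--     """
--     s = seq.strip().upper()
--     ids = [-1] * len(s)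
--     i = 0
--     run_id = 0
--     while i < len(s):
--         if s[i] != "P":
--             i += 1
--             continue
--         j = i + 1
--         while j < len(s) and s[j] == "P":
--             j += 1
--         if j - i >= 2:
--             for k in range(i, j):
--                 ids[k] = run_id
--             run_id += 1
--         i = j
--     return ids
-- ===== SOURCE B (Python) =====
-- def proline_run_ids(seq: str) -> list[int]:
--     s = seq.strip().upper()
--     n = len(s)
--     # pass 1: per-position neighbor test -- a position is in a run iff it is 'P'
--     # and an adjacent position is 'P' (no run-boundary scanning, no group lengths)
--     in_run = [s[i] == "P" and ((i > 0 and s[i - 1] == "P") or (i + 1 < n and s[i + 1] == "P"))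
--               for i in range(n)]
--     # pass 2: label with a counter that steps at each False->True transition
--     out = []
--     rid = -1
--     prev = False
--     for flag in in_run:
--         if flag:
--             if not prev:
--                 rid += 1
--             out.append(rid)
--         else:
--             out.append(-1)
--         prev = flag
--     return out
-- ===== Notes on version B (the rewrite author's own statement) =====
-- stated objective: alternative
-- what changed: Replaces A's nested while-loops that scan run boundaries and write ids into a preallocated array by two staged passes: a per-position neighbor-test pass marking positions whose adjacent character is also 'P', then a transition-counting pass that increments the id at each False->True edge; no run boundaries or run lengths are ever computed.
import Mathlib
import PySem

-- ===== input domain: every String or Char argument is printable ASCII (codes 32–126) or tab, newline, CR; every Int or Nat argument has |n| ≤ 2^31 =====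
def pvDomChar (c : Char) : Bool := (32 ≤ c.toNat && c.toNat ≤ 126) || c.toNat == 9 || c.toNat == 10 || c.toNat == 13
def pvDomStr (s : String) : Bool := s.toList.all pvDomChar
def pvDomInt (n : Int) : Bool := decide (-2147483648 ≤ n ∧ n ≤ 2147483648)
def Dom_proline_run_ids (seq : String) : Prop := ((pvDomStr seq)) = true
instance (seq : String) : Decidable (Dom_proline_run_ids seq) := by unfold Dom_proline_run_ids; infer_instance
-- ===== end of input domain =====

-- B replaces A's boundary-scanning while-loops by two staged passes: a per-position
-- neighbor test marking in-run positions, then transition counting (alternative; same O(n)).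

-- ===== PORT A =====
-- inner `while j < len(s) and s[j] == 'P'` loop
def pvScanJ (s : List Char) (j : Nat) : Nat :=
  if h : j < s.length ∧ s.getD j ' ' = 'P' then pvScanJ s (j + 1) else j
termination_by s.length - j
decreasing_by omega

-- `for k in range(i, j): ids[k] = run_id`
def pvSetRange (ids : List Int) (i m : Nat) (v : Int) : List Int :=
  (List.range' i m).foldl (fun a k => a.set k v) ids

-- needed by pvLoopA's termination proof
theorem pvScanJ_ge (s : List Char) (j : Nat) : j ≤ pvScanJ s j := by
  unfold pvScanJ
  split
  · have : j + 1 ≤ pvScanJ s (j + 1) := pvScanJ_ge s (j + 1)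
    omega
  · omega
termination_by s.length - j
decreasing_by omega

-- outer `while i < len(s)` loop
def pvLoopA (s : List Char) (ids : List Int) (i : Nat) (run_id : Int) : List Int :=
  if h : i < s.length then
    if s.getD i ' ' ≠ 'P' then
      pvLoopA s ids (i + 1) run_id
    else
      let j := pvScanJ s (i + 1)
      if j - i ≥ 2 then
        pvLoopA s (pvSetRange ids i (j - i) run_id) j (run_id + 1)
      else
        pvLoopA s ids j run_id
  else ids
termination_by s.length - i
decreasing_by
  · omega
  · have := pvScanJ_ge s (i + 1); omega
  · have := pvScanJ_ge s (i + 1); omega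

def proline_run_ids (seq : String) : List Int :=
  let s := (PySem.Str.upper (PySem.Str.strip seq)).toList
  pvLoopA s (List.replicate s.length (-1)) 0 0

-- ===== PORT B =====
-- the comprehension's per-position test: s[i]=='P' and ((i>0 and s[i-1]=='P') or (i+1<n and s[i+1]=='P'))
def pvInRunF (s : List Char) (i : Nat) : Bool :=
  decide (s.getD i ' ' = 'P') &&
    ((decide (0 < i) && decide (s.getD (i - 1) ' ' = 'P')) ||
     (decide (i + 1 < s.length) && decide (s.getD (i + 1) ' ' = 'P')))

-- one step of B's labeling loop, state = (out, rid, prev)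
def pvStepB (st : List Int × Int × Bool) (flag : Bool) : List Int × Int × Bool :=
  if flag then
    let rid := if st.2.2 then st.2.1 else st.2.1 + 1
    (st.1 ++ [rid], rid, flag)
  else (st.1 ++ [(-1 : Int)], st.2.1, flag)

def proline_run_ids_alt (seq : String) : List Int :=
  let s := (PySem.Str.upper (PySem.Str.strip seq)).toList
  let in_run := (List.range s.length).map (pvInRunF s)
  (in_run.foldl pvStepB ([], -1, false)).1

-- ===== PRECONDITION & SPEC =====
def Spec_proline_run_ids (seq : String) (out : List Int) : Prop := out = proline_run_ids_alt seq
instance (seq : String) (out : List Int) : Decidable (Spec_proline_run_ids seq out) := by unfold Spec_proline_run_ids; infer_instance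

-- ===== CLAIM (what is proved, stated in full; the proofs are below) =====
def Claim_equal_proline_run_ids : Prop := ∀ (seq : String), Dom_proline_run_ids seq → Spec_proline_run_ids seq (proline_run_ids seq)

-- ===== LEMMAS AND PROOFS =====
-- common specification: run ids computed run by run
def pvSpecF : List Char → Int → List Int
  | [], _ => []
  | c :: rest, rid =>
    if c = 'P' then
      if (rest.takeWhile (· = 'P')).length + 1 ≥ 2 then
        List.replicate ((rest.takeWhile (· = 'P')).length + 1) rid ++
          pvSpecF (rest.dropWhile (· = 'P')) (rid + 1)
      else (-1) :: pvSpecF rest rid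
    else (-1) :: pvSpecF rest rid
termination_by l _ => l.length
decreasing_by
  · exact Nat.lt_succ_of_le (List.length_dropWhile_le _ _)
  · exact Nat.lt_succ_self _
  · exact Nat.lt_succ_self _

theorem pvDropWhile_eq_drop {α : Type} (p : α → Bool) (l : List α) :
    l.dropWhile p = l.drop (l.takeWhile p).length := by
  induction l with
  | nil => rfl
  | cons x xs ih =>
    by_cases h : p x
    · simp [List.dropWhile_cons, h, ih]
    · simp [List.dropWhile_cons, h]

-- ---- B side ----
-- structural versions of B's two passes
def pvNextP : List Char → Bool
  | [] => false
  | c :: _ => decide (c = 'P')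

def pvInRunAux : Bool → List Char → List Bool
  | _, [] => []
  | prevP, c :: rest =>
    (decide (c = 'P') && (prevP || pvNextP rest)) :: pvInRunAux (decide (c = 'P')) rest

def pvBF : List Bool → Int → Bool → List Int
  | [], _, _ => []
  | f :: fs, rid, prev =>
    if f then (if prev then rid else rid + 1) :: pvBF fs (if prev then rid else rid + 1) f
    else (-1) :: pvBF fs rid f

theorem pvFoldB (fs : List Bool) : ∀ (acc : List Int) (rid : Int) (prev : Bool),
    (fs.foldl pvStepB (acc, rid, prev)).1 = acc ++ pvBF fs rid prev := by
  induction fs with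
  | nil => intro acc rid prev; simp [pvBF]
  | cons f fs ih =>
    intro acc rid prev
    by_cases h : f = true <;>
      by_cases hp : prev = true <;>
        simp [pvStepB, pvBF, h, hp, ih, List.append_assoc]

-- the indexed comprehension computes the structural neighbor test
theorem pvInRun_suffix : ∀ (suf pre : List Char),
    (List.range' pre.length suf.length 1).map (pvInRunF (pre ++ suf)) =
    pvInRunAux (decide (pre.getLast? = some 'P')) suf := by
  intro suf
  induction suf with
  | nil => intro pre; simp [pvInRunAux]
  | cons c cs ih =>
    intro pre
    rw [List.length_cons, List.range'_succ, List.map_cons]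
    have htail : (List.range' (pre.length + 1) cs.length 1).map (pvInRunF (pre ++ c :: cs)) =
        pvInRunAux (decide (c = 'P')) cs := by
      have h := ih (pre ++ [c])
      simp only [List.length_append, List.length_cons, List.length_nil,
        List.append_assoc, List.cons_append, List.nil_append,
        List.getLast?_concat, Option.some.injEq] at h
      simpa using h
    rw [htail, pvInRunAux]
    congr 1
    have hget : (pre ++ c :: cs).getD pre.length ' ' = c := by
      simp [List.getD_eq_getElem?_getD, List.getElem?_append_right (le_refl pre.length)]
    have hnext : (decide (pre.length + 1 < (pre ++ c :: cs).length) &&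
        decide ((pre ++ c :: cs).getD (pre.length + 1) ' ' = 'P')) = pvNextP cs := by
      cases cs with
      | nil => simp [pvNextP]
      | cons d ds =>
        have h1 : pre.length + 1 < (pre ++ c :: d :: ds).length := by simp
        have h2 : (pre ++ c :: d :: ds).getD (pre.length + 1) ' ' = d := by
          have h3 : (pre ++ c :: d :: ds)[pre.length + 1]? = some d := by
            rw [List.getElem?_append_right (by omega)]
            simp [Nat.add_sub_cancel_left]
          simp [List.getD_eq_getElem?_getD, h3]
        simp [pvNextP, h1, h2]
    have hprev : (decide (0 < pre.length) &&
        decide ((pre ++ c :: cs).getD (pre.length - 1) ' ' = 'P')) =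
        decide (pre.getLast? = some 'P') := by
      rcases pre.eq_nil_or_concat with rfl | ⟨q, a, rfl⟩
      · simp
      · have hl : (q ++ [a]).length = q.length + 1 := by simp
        have h0 : 0 < (q ++ [a]).length := by simp
        have hg : ((q ++ [a]) ++ c :: cs).getD ((q ++ [a]).length - 1) ' ' = a := by
          have h3 : ((q ++ [a]) ++ c :: cs)[(q ++ [a]).length - 1]? = some a := by
            rw [List.getElem?_append_left (by omega), hl]
            simp [List.getElem?_append_right (le_refl q.length)]
          simp [List.getD_eq_getElem?_getD, h3]
        simp [h0, hg, List.getLast?_concat]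
    rw [pvInRunF, hget, hprev, hnext]

-- after a reset point (next char is not 'P'), earlier history does not matter
theorem pvBF_reset (r : List Char) (rid : Int) (b b' : Bool) (h : pvNextP r = false) :
    pvBF (pvInRunAux b r) rid b' = pvBF (pvInRunAux false r) rid false := by
  cases r with
  | nil => rfl
  | cons c cs =>
    have hc : decide (c = 'P') = false := by simpa [pvNextP] using h
    simp [pvInRunAux, hc, pvBF]

theorem pvNextP_dropWhile (l : List Char) : pvNextP (l.dropWhile (· = 'P')) = false := by
  induction l with
  | nil => rfl
  | cons x xs ih =>
    by_cases hx : x = 'P'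
    · simpa [List.dropWhile_cons, hx] using ih
    · simp [List.dropWhile_cons, hx, pvNextP]

-- inside a run with 'P' behind us, a 'P' position is flagged and keeps the current id
theorem pvBF_P_cons (l : List Char) (rid : Int) :
    pvBF (pvInRunAux true ('P' :: l)) rid true = rid :: pvBF (pvInRunAux true l) rid true := by
  simp [pvInRunAux, pvBF]

-- labeling a maximal run: every position gets the same current id
theorem pvBF_run : ∀ (k : Nat) (r : List Char) (rid : Int), pvNextP r = false →
    pvBF (pvInRunAux true (List.replicate (k + 1) 'P' ++ r)) rid true =
    List.replicate (k + 1) rid ++ pvBF (pvInRunAux false r) rid false := by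
  intro k
  induction k with
  | zero =>
    intro r rid h
    rw [show List.replicate 1 'P' ++ r = 'P' :: r from rfl, pvBF_P_cons,
      pvBF_reset r rid _ _ h]
    simp [List.replicate_succ]
  | succ k ih =>
    intro r rid h
    rw [List.replicate_succ, List.cons_append, pvBF_P_cons, ih r rid h]
    simp [List.replicate_succ, List.cons_append]

theorem pvTakeWhile_repl (l : List Char) :
    l.takeWhile (· = 'P') = List.replicate (l.takeWhile (· = 'P')).length 'P' := by
  rw [List.eq_replicate_iff]
  exact ⟨rfl, fun x hx => by simpa using List.mem_takeWhile_imp hx⟩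

theorem pvNextP_of_takeWhile_nil (l : List Char) (h : l.takeWhile (· = 'P') = []) :
    pvNextP l = false := by
  cases l with
  | nil => rfl
  | cons x xs =>
    by_cases hx : x = 'P'
    · simp [List.takeWhile_cons, hx] at h
    · simp [pvNextP, hx]

-- B computes the run-by-run specification
theorem pvBF_spec : ∀ (s : List Char) (rid : Int),
    pvBF (pvInRunAux false s) (rid - 1) false = pvSpecF s rid := by
  intro s rid
  induction s, rid using pvSpecF.induct with
  | case1 rid => simp [pvInRunAux, pvBF, pvSpecF]
  | case2 rest rid hlen ih =>
    have hrest : rest = List.replicate (rest.takeWhile (· = 'P')).length 'P' ++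
        rest.dropWhile (· = 'P') := by
      conv_lhs => rw [← List.takeWhile_append_dropWhile (p := (· = 'P')) (l := rest)]
      rw [pvTakeWhile_repl rest]
      simp
    have hnr : pvNextP (rest.dropWhile (· = 'P')) = false := pvNextP_dropWhile rest
    obtain ⟨k, hk⟩ : ∃ k, (rest.takeWhile (· = 'P')).length = k + 1 :=
      ⟨(rest.takeWhile (· = 'P')).length - 1, by omega⟩
    have hnx : pvNextP rest = true := by
      rw [hrest, hk]
      simp [List.replicate_succ, pvNextP]
    rw [pvSpecF]
    simp only [if_pos rfl, if_pos hlen]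
    rw [pvInRunAux]
    simp only [decide_true, Bool.false_or, hnx, Bool.true_and]
    rw [pvBF]
    simp only [if_pos rfl, Bool.false_eq_true, if_neg (by simp : ¬ False)]
    have harg : pvInRunAux true rest =
        pvInRunAux true (List.replicate (k + 1) 'P' ++ rest.dropWhile (· = 'P')) := by
      conv_lhs => rw [hrest, hk]
    rw [harg, pvBF_run k _ _ hnr]
    have hid : rid - 1 + 1 = rid := by omega
    have ih' : pvBF (pvInRunAux false (rest.dropWhile (· = 'P'))) rid false =
        pvSpecF (rest.dropWhile (· = 'P')) (rid + 1) := by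
      simpa using ih
    rw [hid, ih', hk]
    simp [List.replicate_succ]
  | case3 rest rid hlen ih =>
    have ht : rest.takeWhile (· = 'P') = [] := by
      have : (rest.takeWhile (· = 'P')).length = 0 := by omega
      exact List.length_eq_zero_iff.mp this
    have hnx : pvNextP rest = false := pvNextP_of_takeWhile_nil rest ht
    rw [pvSpecF]
    simp only [if_pos rfl, if_neg hlen]
    rw [pvInRunAux]
    simp only [decide_true, Bool.false_or, hnx, Bool.true_and]
    rw [pvBF]
    simp only [Bool.false_eq_true, if_neg (by simp : ¬ False)]
    rw [pvBF_reset rest (rid - 1) _ _ hnx, ih]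
    simp
  | case4 c rest rid hP ih =>
    have hc : decide (c = 'P') = false := by simp [hP]
    rw [pvSpecF]
    simp only [if_neg hP]
    rw [pvInRunAux]
    simp only [hc, Bool.false_and]
    rw [pvBF]
    simp only [Bool.false_eq_true, if_neg (by simp : ¬ False)]
    rw [ih]

-- ---- A side ----
theorem pvScanJ_spec (s : List Char) (j : Nat) :
    pvScanJ s j = j + ((s.drop j).takeWhile (· = 'P')).length := by
  unfold pvScanJ
  split
  · rename_i h
    have hd : s.drop j = s[j] :: s.drop (j + 1) := List.drop_eq_getElem_cons h.1
    have hg : s[j] = 'P' := by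
      have := h.2; rwa [List.getD_eq_getElem s ' ' h.1] at this
    rw [pvScanJ_spec s (j + 1), hd, List.takeWhile_cons, if_pos (by simp [hg])]
    simp; omega
  · rename_i h
    by_cases hj : j < s.length
    · have hg : s.getD j ' ' ≠ 'P' := fun hc => h ⟨hj, hc⟩
      have hd : s.drop j = s[j] :: s.drop (j + 1) := List.drop_eq_getElem_cons hj
      have : s[j] ≠ 'P' := by rwa [List.getD_eq_getElem s ' ' hj] at hg
      rw [hd, List.takeWhile_cons, if_neg (by simp [this])]
      simp
    · rw [List.drop_eq_nil_of_le (by omega)]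
      simp
termination_by s.length - j
decreasing_by omega

theorem pvSetRange_spec (m : Nat) : ∀ (ids : List Int) (i : Nat) (v : Int),
    i + m ≤ ids.length →
    pvSetRange ids i m v = ids.take i ++ List.replicate m v ++ ids.drop (i + m) := by
  induction m with
  | zero => intro ids i v _; simp [pvSetRange]
  | succ m ih =>
    intro ids i v h
    have hi : i < ids.length := by omega
    have hl : (ids.take i).length = i := by simp; omega
    have hstep : pvSetRange ids i (m + 1) v = pvSetRange (ids.set i v) (i + 1) m v := by
      simp [pvSetRange, List.range'_succ]
    have hsetlen : (ids.set i v).length = ids.length := by simp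
    have hset : ids.set i v = ids.take i ++ v :: ids.drop (i + 1) := by
      rw [List.set_eq_take_append_cons_drop, if_pos hi]
    rw [hstep, ih (ids.set i v) (i + 1) v (by rw [hsetlen]; omega)]
    have e1 : (ids.set i v).take (i + 1) = ids.take i ++ [v] := by
      rw [hset, List.take_append, hl, List.take_of_length_le (by rw [hl]; omega)]
      have h1 : i + 1 - i = 1 := by omega
      rw [h1]
      simp
    have e2 : (ids.set i v).drop (i + 1 + m) = ids.drop (i + (m + 1)) := by
      rw [hset, List.drop_append, hl, List.drop_eq_nil_of_le (by rw [hl]; omega)]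
      have h2 : i + 1 + m - i = m + 1 := by omega
      rw [h2]
      simp [List.drop_drop]
      congr 1
      omega
    rw [e1, e2]
    simp [List.replicate_succ, List.append_assoc]

theorem pvLoopA_spec (s : List Char) : ∀ (n i : Nat) (ids : List Int) (rid : Int),
    s.length - i ≤ n →
    ids.length = s.length →
    ids.drop i = List.replicate (s.length - i) (-1) →
    pvLoopA s ids i rid = ids.take i ++ pvSpecF (s.drop i) rid := by
  intro n
  induction n with
  | zero =>
    intro i ids rid hn hlen _
    have hi : ¬ i < s.length := by omega
    have hle : ids.length ≤ i := by omega
    rw [pvLoopA, dif_neg hi, List.drop_eq_nil_of_le (by omega),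
      List.take_of_length_le hle]
    simp [pvSpecF]
  | succ n ih =>
    intro i ids rid hn hlen hdrop
    by_cases hi : i < s.length
    · have hdi : s.drop i = s[i] :: s.drop (i + 1) := List.drop_eq_getElem_cons hi
      have hgi : s.getD i ' ' = s[i] := List.getD_eq_getElem s ' ' hi
      have hidsi : ids[i]? = some (-1) := by
        have hne : (ids.drop i).head? = some (-1) := by
          rw [hdrop]
          cases hc : s.length - i with
          | zero => omega
          | succ k => simp [List.replicate_succ]
        rw [List.head?_drop] at hne
        exact hne
      have htake1 : ids.take (i + 1) = ids.take i ++ [-1] := by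
        rw [List.take_add_one, hidsi]
        rfl
      have hdrop1 : ids.drop (i + 1) = List.replicate (s.length - (i + 1)) (-1) := by
        have : ids.drop (i + 1) = (ids.drop i).drop 1 := by
          rw [List.drop_drop]
        rw [this, hdrop, List.drop_replicate]
        congr 1
      by_cases hP : s[i] = 'P'
      · have hscan : pvScanJ s (i + 1) =
            i + 1 + ((s.drop (i + 1)).takeWhile (· = 'P')).length := pvScanJ_spec s (i + 1)
        set t := (s.drop (i + 1)).takeWhile (· = 'P') with htdef
        have htle : t.length ≤ s.length - (i + 1) := by
          have := (List.takeWhile_sublist (p := (· = ('P' : Char)))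
            (l := s.drop (i + 1))).length_le
          simpa using this
        have hj : pvScanJ s (i + 1) = i + 1 + t.length := hscan
        have hdw : (s.drop (i + 1)).dropWhile (· = 'P') = s.drop (i + 1 + t.length) := by
          rw [pvDropWhile_eq_drop, ← htdef, List.drop_drop]
        by_cases hrun : t.length ≥ 1
        · rw [pvLoopA, dif_pos hi, if_neg (by simp [List.getD_eq_getElem?_getD, List.getElem?_eq_getElem hi, hP]), if_pos (by rw [hj]; omega)]
          have hjm : pvScanJ s (i + 1) - i = t.length + 1 := by omega
          have hjle : i + 1 + t.length ≤ s.length := by omega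
          have hsr : pvSetRange ids i (t.length + 1) rid =
              ids.take i ++ List.replicate (t.length + 1) rid ++ ids.drop (i + (t.length + 1)) :=
            pvSetRange_spec (t.length + 1) ids i rid (by omega)
          rw [hjm, hj, hsr]
          set ids' := ids.take i ++ List.replicate (t.length + 1) rid ++
            ids.drop (i + (t.length + 1)) with hids'
          have hlt : (ids.take i).length = i := by simp; omega
          have hlen' : ids'.length = s.length := by
            rw [hids']; simp; omega
          have hpre : (ids.take i ++ List.replicate (t.length + 1) rid).length =
              i + 1 + t.length := by simp; omega
          have hdrop' : ids'.drop (i + 1 + t.length) =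
              List.replicate (s.length - (i + 1 + t.length)) (-1) := by
            rw [hids', List.drop_append, List.drop_of_length_le (le_of_eq hpre), hpre]
            simp only [Nat.sub_self, List.drop_zero, List.nil_append]
            have hdd : ids.drop (i + (t.length + 1)) = (ids.drop i).drop (t.length + 1) := by
              rw [List.drop_drop]
            rw [hdd, hdrop, List.drop_replicate]
            congr 1
            omega
          have htake' : ids'.take (i + 1 + t.length) =
              ids.take i ++ List.replicate (t.length + 1) rid := by
            rw [hids', List.take_append,
              List.take_of_length_le (le_of_eq hpre), hpre]
            simp
          rw [ih (i + 1 + t.length) ids' (rid + 1) (by omega) hlen' hdrop', htake']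
          rw [hdi, pvSpecF, if_pos hP, ← htdef, if_pos (by omega), hdw]
          simp [List.append_assoc]
        · have ht0 : t.length = 0 := by omega
          have hj1 : pvScanJ s (i + 1) = i + 1 := by omega
          rw [pvLoopA, dif_pos hi, if_neg (by simp [List.getD_eq_getElem?_getD, List.getElem?_eq_getElem hi, hP]), if_neg (by rw [hj1]; omega), hj1]
          rw [ih (i + 1) ids rid (by omega) hlen hdrop1, htake1]
          rw [hdi, pvSpecF, if_pos hP, ← htdef, if_neg (by omega)]
          simp
      · rw [pvLoopA, dif_pos hi, if_pos (by simp [List.getD_eq_getElem?_getD, List.getElem?_eq_getElem hi, hP])]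
        rw [ih (i + 1) ids rid (by omega) hlen hdrop1, htake1]
        rw [hdi, pvSpecF, if_neg hP]
        simp
    · have hle : ids.length ≤ i := by omega
      rw [pvLoopA, dif_neg hi, List.drop_eq_nil_of_le (by omega),
        List.take_of_length_le hle]
      simp [pvSpecF]

-- ===== VERDICT (by name: the statement is the Claim_ definition above) =====
theorem proline_run_ids_spec : Claim_equal_proline_run_ids := by
  intro seq _
  simp only [Spec_proline_run_ids, proline_run_ids, proline_run_ids_alt]
  set s := (PySem.Str.upper (PySem.Str.strip seq)).toList with hs
  have hB : (List.range s.length).map (pvInRunF s) = pvInRunAux false s := by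
    have h := pvInRun_suffix s []
    simpa [List.range_eq_range'] using h
  rw [pvLoopA_spec s s.length 0 (List.replicate s.length (-1)) 0 (by omega) (by simp) (by simp)]
  rw [hB, pvFoldB]
  have h0 := pvBF_spec s 0
  simp only [List.take_zero, List.drop_zero, List.nil_append]
  rw [← h0]
  norm_num
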